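-- pv_equiv track=rewrite | github.com/ThomasTrepanier/log6307-final-project | data/interim/stackoverflow/src/python/25_18.py | find_substring_length_k_most_vowels
-- ===== SOURCE A (Python) =====
-- def find_substring_length_k_most_vowels(s: str, k: int) -> str:
--     '''Returns first substring of length k that has the max number of vowels.'''
--     vowels = set('aeiou')
--     max_vowel_count = curr_vowel_count = 0
--     max_window_start, max_window_end = 0, -1
--     window_start = 0
--     for window_end, ch in enumerate(s):
--         if ch in vowels:
--             curr_vowel_count += 1
--         if window_end - window_start + 1 == k:
--             if curr_vowel_count > max_vowel_count:
--                 max_vowel_count = curr_vowel_count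
--                 max_window_start, max_window_end = window_start, window_end
--             curr_vowel_count -= 1 if s[window_start] in vowels else 0
--             window_start += 1
--     return s[max_window_start:max_window_end + 1]
-- ===== SOURCE B (Python) =====
-- def find_substring_length_k_most_vowels(s: str, k: int) -> str:
--     '''Returns first substring of length k that has the max number of vowels.'''
--     vowels = 'aeiou'
--     pref = [0]
--     for ch in s:
--         pref.append(pref[-1] + (1 if ch in vowels else 0))
--     best, best_count = -1, 0
--     if 1 <= k <= len(s):
--         for i in range(len(s) - k + 1):
--             c = pref[i + k] - pref[i]
--             if c > best_count:
--                 best, best_count = i, c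
--     return s[best:best + k] if best >= 0 else ''
-- ===== Notes on version B (the rewrite author's own statement) =====
-- stated objective: alternative
-- what changed: Replaces A's single sliding-window pass with mutable window bookkeeping by a prefix-sum table of vowel counts plus an explicit scan over window starts computing each window's count as pref[i+k]-pref[i].
import Mathlib
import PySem

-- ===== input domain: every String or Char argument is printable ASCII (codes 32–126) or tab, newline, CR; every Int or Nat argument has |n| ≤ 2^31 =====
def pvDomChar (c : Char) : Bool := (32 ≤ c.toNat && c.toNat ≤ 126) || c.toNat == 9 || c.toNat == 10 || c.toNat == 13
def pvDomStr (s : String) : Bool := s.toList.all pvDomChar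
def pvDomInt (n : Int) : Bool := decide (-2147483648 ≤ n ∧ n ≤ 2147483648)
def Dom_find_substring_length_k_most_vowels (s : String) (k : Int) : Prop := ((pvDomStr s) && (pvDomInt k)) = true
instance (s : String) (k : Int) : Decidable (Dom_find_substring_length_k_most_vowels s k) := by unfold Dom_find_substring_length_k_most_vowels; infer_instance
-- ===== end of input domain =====

-- B replaces the sliding window by a vowel prefix-sum table and a scan over window starts; same O(n) cost, different structure.

-- ===== PORT A =====
-- vowels = set('aeiou')
def pvVowelsA : PySem.Set Char := PySem.Set.ofList "aeiou".toList

-- A's loop body; state = (max_vowel_count, curr_vowel_count, max_window_start, max_window_end, window_start)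
def pvStepA (cs : List Char) (k : Int) (st : Int × Int × Int × Int × Int) (p : Int × Char) :
    Int × Int × Int × Int × Int :=
  let maxc := st.1; let currc := st.2.1; let maxs := st.2.2.1; let maxe := st.2.2.2.1; let ws := st.2.2.2.2
  let we := p.1; let ch := p.2
  let currc := if pvVowelsA.contains ch then currc + 1 else currc
  if we - ws + 1 = k then
    let m := if currc > maxc then (currc, ws, we) else (maxc, maxs, maxe)
    -- s[window_start] is always in range when this branch runs (ws ≤ we < len(s)); the getD default is unreachable
    let currc := currc - (if pvVowelsA.contains ((PySem.List.pyGet? cs ws).getD ' ') then 1 else 0)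
    (m.1, currc, m.2.1, m.2.2, ws + 1)
  else (maxc, currc, maxs, maxe, ws)

-- literal port of A's sliding-window pass
def find_substring_length_k_most_vowels (s : String) (k : Int) : String :=
  let cs := s.toList
  let st := (PySem.List.enumerate cs 0).foldl (pvStepA cs k) (0, 0, 0, -1, 0)
  String.ofList (PySem.List.slice cs (some st.2.2.1) (some (st.2.2.2.1 + 1)))

-- ===== PORT B =====
-- literal port of Source B: prefix sums of vowel counts, then a scan over window starts
def find_substring_length_k_most_vowels_alt (s : String) (k : Int) : String :=
  let cs := s.toList
  let pref := cs.foldl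
    (fun (pref : List Int) ch =>
      -- pref.append(pref[-1] + (1 if ch in 'aeiou' else 0)); pref is never empty, getD default unreachable
      pref ++ [PySem.List.pyGetD pref (-1) 0 + (if "aeiou".toList.contains ch then 1 else 0)])
    [(0 : Int)]
  let n : Int := cs.length
  let st :=
    if 1 ≤ k ∧ k ≤ n then
      (PySem.List.pyRange 0 (n - k + 1) 1).foldl
        (fun (bs : Int × Int) i =>
          let c := PySem.List.pyGetD pref (i + k) 0 - PySem.List.pyGetD pref i 0
          if c > bs.2 then (i, c) else bs)
        (-1, 0)
    else (-1, 0)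
  if st.1 ≥ 0 then String.ofList (PySem.List.slice cs (some st.1) (some (st.1 + k))) else ""

-- ===== PRECONDITION & SPEC =====
def Spec_find_substring_length_k_most_vowels (s : String) (k : Int) (out : String) : Prop := out = find_substring_length_k_most_vowels_alt s k
instance (s : String) (k : Int) (out : String) : Decidable (Spec_find_substring_length_k_most_vowels s k out) := by unfold Spec_find_substring_length_k_most_vowels; infer_instance

-- ===== CLAIM (what is proved, stated in full; the proofs are below) =====
def Claim_equal_find_substring_length_k_most_vowels : Prop := ∀ (s : String) (k : Int), Dom_find_substring_length_k_most_vowels s k → Spec_find_substring_length_k_most_vowels s k (find_substring_length_k_most_vowels s k)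

-- ===== LEMMAS AND PROOFS =====

def pvV (c : Char) : Int := if c ∈ (['a', 'e', 'i', 'o', 'u'] : List Char) then 1 else 0

def pvP (cs : List Char) (i : Nat) : Int := ((cs.take i).map pvV).sum

-- the common "best window start" fold (first start with strictly larger vowel count wins)
def pvBest (cs : List Char) (kn m : Nat) : Int × Int :=
  (List.range m).foldl
    (fun bs i => if pvP cs (i + kn) - pvP cs i > bs.2 then ((i : Int), pvP cs (i + kn) - pvP cs i) else bs)
    (-1, 0)

-- A's loop state after processing the first j characters
def pvSpecA (cs : List Char) (k : Int) (j : Nat) : Int × Int × Int × Int × Int :=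
  if 1 ≤ k ∧ k ≤ (j : Int) then
    let kn := k.toNat
    let b := pvBest cs kn (j - kn + 1)
    (b.2, pvP cs j - pvP cs (j - kn + 1),
      (if b.1 < 0 then ((0 : Int), (-1 : Int)) else (b.1, b.1 + k - 1)).1,
      (if b.1 < 0 then ((0 : Int), (-1 : Int)) else (b.1, b.1 + k - 1)).2,
      ((j - kn + 1 : Nat) : Int))
  else (0, pvP cs j, 0, -1, 0)

lemma pvVowelsA_contains (c : Char) : pvVowelsA.contains c = decide (c ∈ (['a', 'e', 'i', 'o', 'u'] : List Char)) := by
  simp [pvVowelsA, PySem.Set.contains]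

lemma pvP_zero (cs : List Char) : pvP cs 0 = 0 := rfl

lemma pvP_succ (cs : List Char) (j : Nat) (h : j < cs.length) :
    pvP cs (j + 1) = pvP cs j + pvV cs[j] := by
  unfold pvP
  simp only [List.map_take]
  rw [List.sum_take_succ (cs.map pvV) j (by simpa using h)]
  simp

lemma pvP_append_left (pre rest : List Char) (j : Nat) (h : j ≤ pre.length) :
    pvP (pre ++ rest) j = pvP pre j := by
  simp [pvP, List.take_append_of_le_length h]

lemma pvBest_succ (cs : List Char) (kn m : Nat) :
    pvBest cs kn (m + 1) =
      (if pvP cs (m + kn) - pvP cs m > (pvBest cs kn m).2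
        then ((m : Int), pvP cs (m + kn) - pvP cs m) else pvBest cs kn m) := by
  simp [pvBest, List.range_succ]
lemma hvc (c : Char) (x : Int) : (if pvVowelsA.contains c then x + 1 else x) = x + pvV c := by
  rw [pvVowelsA_contains]
  by_cases h : c ∈ (['a','e','i','o','u'] : List Char) <;> simp [pvV, h]
lemma hv1 (c : Char) : (if pvVowelsA.contains c then (1:Int) else 0) = pvV c := by
  rw [pvVowelsA_contains]
  by_cases h : c ∈ (['a','e','i','o','u'] : List Char) <;> simp [pvV, h]

lemma pvStepA_spec (cs : List Char) (k : Int) (j : Nat) (hj : j < cs.length) :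
    pvStepA cs k (pvSpecA cs k j) ((j : Int), cs[j]) = pvSpecA cs k (j + 1) := by
  by_cases hk : 1 ≤ k ∧ k ≤ (j : Int)
  · obtain ⟨hk1, hkj⟩ := hk
    have hknj : k.toNat ≤ j := by omega
    have hkn1 : 1 ≤ k.toNat := by omega
    rw [pvSpecA, if_pos ⟨hk1, hkj⟩, pvSpecA, if_pos (by push_cast; omega)]
    simp only [pvStepA, hvc]
    rw [if_pos (by push_cast; omega)]
    have hm : (j + 1) - k.toNat + 1 = (j - k.toNat + 1) + 1 := by omega
    rw [hm, pvBest_succ cs k.toNat (j - k.toNat + 1)]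
    have hik : (j - k.toNat + 1) + k.toNat = j + 1 := by omega
    rw [hik]
    have hilt : j - k.toNat + 1 < cs.length := by omega
    have hget : PySem.List.pyGet? cs ((j - k.toNat + 1 : Nat) : Int) = some cs[j - k.toNat + 1] := by
      rw [PySem.List.pyGet?_natCast]
      exact List.getElem?_eq_getElem hilt
    have hW : pvP cs j - pvP cs (j - k.toNat + 1) + pvV cs[j]
        = pvP cs (j + 1) - pvP cs (j - k.toNat + 1) := by
      rw [pvP_succ cs j hj]; ring
    rw [hW, hget]
    rw [Option.getD_some, hv1 (cs[j - k.toNat + 1]'hilt)]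
    have hsub : pvP cs (j + 1) - pvP cs (j - k.toNat + 1) - pvV cs[j - k.toNat + 1]
        = pvP cs (j + 1) - pvP cs (j - k.toNat + 1 + 1) := by
      rw [pvP_succ cs (j - k.toNat + 1) hilt]; ring
    rw [hsub]
    have hj' : ((j : Nat) : Int) = ((j - k.toNat + 1 : Nat) : Int) + k - 1 := by push_cast; omega
    rw [hj']
    have hcast : ((j - k.toNat + 1 + 1 : Nat) : Int) = ((j - k.toNat + 1 : Nat) : Int) + 1 := by
      push_cast; ring
    rw [hcast]
    by_cases hgt : pvP cs (j + 1) - pvP cs (j - k.toNat + 1) > (pvBest cs k.toNat (j - k.toNat + 1)).2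
    · simp only [if_pos hgt]
      rw [if_neg (by omega : ¬((j - k.toNat + 1 : Nat) : Int) < 0)]
    · simp only [if_neg hgt]
  · rw [pvSpecA, if_neg hk]
    by_cases hkj : k = (j : Int) + 1
    · rw [pvSpecA, if_pos (show (1:Int) ≤ k ∧ k ≤ ((j + 1 : Nat) : Int) from by push_cast; omega)]
      simp only [pvStepA, hvc]
      rw [if_pos (show (j : Int) - 0 + 1 = k from by omega)]
      have hknj : k.toNat = j + 1 := by omega
      have hm1 : (j + 1) - k.toNat + 1 = 1 := by omega
      rw [hm1, hknj]
      have h1 : pvBest cs (j + 1) 1 =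
          (if pvP cs (0 + (j + 1)) - pvP cs 0 > (pvBest cs (j + 1) 0).2
            then ((0 : Int), pvP cs (0 + (j + 1)) - pvP cs 0) else pvBest cs (j + 1) 0) :=
        pvBest_succ cs (j + 1) 0
      have h0 : pvBest cs (j + 1) 0 = (-1, 0) := rfl
      rw [h1, h0]
      simp only [Nat.zero_add, pvP_zero, sub_zero]
      have hW : pvP cs j + pvV cs[j] = pvP cs (j + 1) := (pvP_succ cs j hj).symm
      rw [hW]
      have hget : PySem.List.pyGet? cs (0 : Int) = some (cs[0]'(by omega)) := by
        rw [PySem.List.pyGet?_zero]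
        exact List.getElem?_eq_getElem (by omega : 0 < cs.length)
      rw [hget, Option.getD_some, hv1 (cs[0]'(by omega))]
      have h01 : pvP cs 1 = pvV (cs[0]'(by omega)) := by
        have := pvP_succ cs 0 (by omega : 0 < cs.length)
        rw [pvP_zero] at this
        simpa using this
      by_cases hgt : pvP cs (j + 1) > 0
      · simp only [if_pos hgt]
        rw [if_neg (show ¬(0 : Int) < 0 from by omega)]
        simp only [Prod.mk.injEq]
        and_intros <;> first | trivial | (rw [h01]) | (rw [← h01]) | omega
      · simp only [if_neg hgt]
        rw [if_pos (show (-1 : Int) < 0 from by omega)]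
        simp only [Prod.mk.injEq]
        and_intros <;> first | trivial | (rw [h01])
    · rw [pvSpecA, if_neg (show ¬((1:Int) ≤ k ∧ k ≤ ((j + 1 : Nat) : Int)) from by push_cast; omega)]
      simp only [pvStepA, hvc]
      rw [if_neg (show ¬((j : Int) - 0 + 1 = k) from by omega)]
      simp only [Prod.mk.injEq]
      and_intros <;> first | trivial | exact (pvP_succ cs j hj).symm
lemma pvLoopA (k : Int) (pre : List Char) : ∀ rest : List Char,
    (PySem.List.enumerate pre 0).foldl (pvStepA (pre ++ rest) k) (0, 0, 0, -1, 0)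
      = pvSpecA (pre ++ rest) k pre.length := by
  induction pre using List.reverseRecOn with
  | nil =>
    intro rest
    simp only [List.nil_append, List.length_nil]
    rw [pvSpecA, if_neg (by push_cast; omega)]
    simp [PySem.List.enumerate, pvP]
  | append_singleton pre c ih =>
    intro rest
    have hcs : (pre ++ [c]) ++ rest = pre ++ (c :: rest) := by simp
    rw [hcs, PySem.List.enumerate_append, List.foldl_append, ih (c :: rest)]
    simp only [PySem.List.enumerate_cons, PySem.List.enumerate_nil, List.foldl_cons, List.foldl_nil]
    have hj : pre.length < (pre ++ (c :: rest)).length := by simp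
    have hget : (pre ++ (c :: rest))[pre.length]'hj = c := by
      rw [List.getElem_append_right (Nat.le_refl pre.length)]
      simp
    have := pvStepA_spec (pre ++ (c :: rest)) k pre.length hj
    rw [hget] at this
    rw [show ((0 : Int) + (pre.length : Int)) = (pre.length : Int) by ring, this]
    simp
lemma pvV_mem (c : Char) : (if "aeiou".toList.contains c then (1:Int) else 0) = pvV c := by
  by_cases h : c ∈ (['a','e','i','o','u'] : List Char) <;>
    simp [pvV, h, show "aeiou".toList = ['a','e','i','o','u'] from rfl]

lemma pvPref_eq (cs : List Char) :
    cs.foldl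
      (fun (pref : List Int) ch =>
        pref ++ [PySem.List.pyGetD pref (-1) 0 + (if "aeiou".toList.contains ch then 1 else 0)])
      [(0 : Int)]
    = (List.range (cs.length + 1)).map (pvP cs) := by
  induction cs using List.reverseRecOn with
  | nil => simp [pvP]
  | append_singleton cs c ih =>
    rw [List.foldl_append, ih]
    simp only [List.foldl_cons, List.foldl_nil]
    have hne : (List.range (cs.length + 1)).map (pvP cs) ≠ [] := by simp
    rw [PySem.List.pyGetD_neg_one _ _ hne]
    have hlast : ((List.range (cs.length + 1)).map (pvP cs)).getLast hne = pvP cs cs.length := by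
      rw [List.getLast_eq_getElem]
      simp
    rw [hlast, pvV_mem]
    have hR : (List.range ((cs ++ [c]).length + 1)).map (pvP (cs ++ [c]))
        = (List.range (cs.length + 1)).map (pvP cs) ++ [pvP cs cs.length + pvV c] := by
      have hlen : (cs ++ [c]).length + 1 = (cs.length + 1) + 1 := by simp
      rw [hlen, List.range_succ, List.map_append]
      congr 1
      · apply List.map_congr_left
        intro i hi
        rw [List.mem_range] at hi
        exact pvP_append_left cs [c] i (by omega)
      · simp only [List.map_cons, List.map_nil]
        congr 1
        rw [pvP_succ (cs ++ [c]) cs.length (by simp), pvP_append_left cs [c] cs.length (le_refl _)]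
        congr 1
        rw [List.getElem_append_right (Nat.le_refl cs.length)]
        simp
    rw [hR]
lemma pvFoldl_congr_mem {α β : Type} (l : List α) (f g : β → α → β) (i : β)
    (h : ∀ b a, a ∈ l → f b a = g b a) : l.foldl f i = l.foldl g i := by
  induction l generalizing i with
  | nil => rfl
  | cons x xs ih =>
    simp only [List.foldl_cons, h i x (by simp)]
    exact ih _ (fun b a ha => h b a (by simp [ha]))

lemma pvInnerB (cs : List Char) (k : Int) (hk1 : 1 ≤ k) (hkn : k ≤ (cs.length : Int)) :
    (PySem.List.pyRange 0 ((cs.length : Int) - k + 1) 1).foldl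
      (fun (bs : Int × Int) i =>
        let c := PySem.List.pyGetD ((List.range (cs.length + 1)).map (pvP cs)) (i + k) 0
                 - PySem.List.pyGetD ((List.range (cs.length + 1)).map (pvP cs)) i 0
        if c > bs.2 then (i, c) else bs)
      (-1, 0)
    = pvBest cs k.toNat (cs.length - k.toNat + 1) := by
  have hm : ((cs.length : Int) - k + 1) = ((cs.length - k.toNat + 1 : Nat) : Int) := by push_cast; omega
  rw [hm, PySem.List.pyRange_zero_natCast, List.foldl_map]
  unfold pvBest
  apply pvFoldl_congr_mem
  intro b i hi
  rw [List.mem_range] at hi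
  have hik : ((i : Int) + k) = ((i + k.toNat : Nat) : Int) := by push_cast; omega
  simp only [hik, PySem.List.pyGetD_natCast,
      PySem.List.getD_map_range _ _ _ _ (by omega : i + k.toNat < cs.length + 1),
      PySem.List.getD_map_range _ _ _ _ (by omega : i < cs.length + 1)]

-- ===== VERDICT (by name: the statement is the Claim_ definition above) =====
theorem find_substring_length_k_most_vowels_spec : Claim_equal_find_substring_length_k_most_vowels := by
  intro s k _
  unfold Spec_find_substring_length_k_most_vowels
  have hA := pvLoopA k s.toList []
  rw [List.append_nil] at hA
  simp only [find_substring_length_k_most_vowels, find_substring_length_k_most_vowels_alt, hA,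
    pvPref_eq]
  by_cases hk : 1 ≤ k ∧ k ≤ (s.toList.length : Int)
  · rw [if_pos hk, pvInnerB s.toList k hk.1 hk.2, pvSpecA, if_pos hk]
    simp only []
    by_cases hneg : (pvBest s.toList k.toNat (s.toList.length - k.toNat + 1)).1 < 0
    · rw [if_pos hneg, if_neg (by omega : ¬(pvBest s.toList k.toNat (s.toList.length - k.toNat + 1)).1 ≥ 0)]
      norm_num
      simp [PySem.List.slice_to]
    · rw [if_neg hneg, if_pos (by omega : (pvBest s.toList k.toNat (s.toList.length - k.toNat + 1)).1 ≥ 0)]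
      have : (pvBest s.toList k.toNat (s.toList.length - k.toNat + 1)).1 + k - 1 + 1
          = (pvBest s.toList k.toNat (s.toList.length - k.toNat + 1)).1 + k := by ring
      rw [this]
  · rw [if_neg hk, pvSpecA, if_neg hk]
    rw [if_neg (by omega : ¬(-1 : Int) ≥ 0)]
    norm_num
    simp [PySem.List.slice_to]
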